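-- pv_equiv track=rewrite | github.com/farahabdelli/Euro-Vision-prediction | code/tweet_collection.py | format_field_value
-- ===== SOURCE A (Python) =====
-- def format_field_value(field_value):
--     unauthorized_chars = [
--         "&",
--         "{",
--         "(",
--         "[",
--         "-",
--         "|",
--         "~",
--         "`",
--         "\\",
--         "_",
--         "^",
--         ")",
--         "]",
--         "+",
--         "=",
--         "}",
--         "?",
--         "!",
--         ",",
--         ";",
--         ".",
--         "/",
--         ":",
--         "*",
--         "%",
--     ]
--
--     for char in unauthorized_chars:
--         field_value = field_value.replace(char, "")
--         field_value = field_value.strip()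
--
--     field_value.replace("United KingdomUK", "United Kingdom")
--     return field_value
-- ===== SOURCE B (Python) =====
-- def format_field_value(field_value):
--     bad = set("&{([-|~`\\_^)]+=}?!,;./:*%")
--     return "".join(ch for ch in field_value if ch not in bad).strip()
-- ===== Notes on version B (the rewrite author's own statement) =====
-- stated objective: simpler
-- what changed: B makes one pass over the input filtering characters against a set and strips once at the end, instead of A's 25 passes of str.replace each followed by a redundant strip; A's discarded no-op replace call is dropped.
import Mathlib
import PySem

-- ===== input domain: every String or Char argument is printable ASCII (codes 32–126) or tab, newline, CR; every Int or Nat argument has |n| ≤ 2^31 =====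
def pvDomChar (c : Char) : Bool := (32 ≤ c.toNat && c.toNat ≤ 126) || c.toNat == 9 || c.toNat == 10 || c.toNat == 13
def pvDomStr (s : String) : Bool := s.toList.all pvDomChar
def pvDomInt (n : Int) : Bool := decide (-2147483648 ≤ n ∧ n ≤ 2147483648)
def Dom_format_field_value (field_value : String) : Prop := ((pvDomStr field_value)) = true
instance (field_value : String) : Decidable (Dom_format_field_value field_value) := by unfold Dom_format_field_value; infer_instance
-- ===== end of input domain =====

-- B replaces A's 25 replace-then-strip passes by one filtering pass over the input and a single
-- final strip (objective: simpler); A's discarded no-op 'United KingdomUK' replace is dropped.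

-- ===== PORT A =====
-- the unauthorized_chars list, in A's order
def pvBadA : List String :=
  ["&", "{", "(", "[", "-", "|", "~", "`", "\\", "_", "^", ")", "]",
   "+", "=", "}", "?", "!", ",", ";", ".", "/", ":", "*", "%"]

def format_field_value (field_value : String) : String :=
  -- for char in unauthorized_chars: field_value = field_value.replace(char, ""); field_value = field_value.strip()
  -- (A's final 'field_value.replace("United KingdomUK", …)' discards its result, so it is a no-op)
  pvBadA.foldl (fun s ch => PySem.Str.strip (PySem.Str.replace s ch "")) field_value

-- ===== PORT B =====
def pvBadB : List Char :=
  ['&', '{', '(', '[', '-', '|', '~', '`', '\\', '_', '^', ')', ']',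
   '+', '=', '}', '?', '!', ',', ';', '.', '/', ':', '*', '%']

def format_field_value_alt (field_value : String) : String :=
  -- ''.join(ch for ch in field_value if ch not in bad).strip()
  PySem.Str.strip (String.ofList (field_value.toList.filter (fun c => !(pvBadB.contains c))))

-- ===== PRECONDITION & SPEC =====
def Spec_format_field_value (field_value : String) (out : String) : Prop := out = format_field_value_alt field_value
instance (field_value : String) (out : String) : Decidable (Spec_format_field_value field_value out) := by unfold Spec_format_field_value; infer_instance

-- ===== CLAIM (what is proved, stated in full; the proofs are below) =====
def Claim_equal_format_field_value : Prop := ∀ (field_value : String), Dom_format_field_value field_value → Spec_format_field_value field_value (format_field_value field_value)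

-- ===== LEMMAS AND PROOFS =====

-- replace with a one-char pattern and empty replacement is a filter
theorem pv_go_filter (c : Char) (l : List Char) (fuel : Nat) (hf : l.length ≤ fuel) (acc : List Char) :
    PySem.Chars.replace.go [c] [] fuel l acc = acc.reverse ++ l.filter (fun x => x != c) := by
  induction l generalizing fuel acc with
  | nil => cases fuel <;> simp [PySem.Chars.replace.go]
  | cons ch t ih =>
    cases fuel with
    | zero => simp at hf
    | succ f =>
      have hft : t.length ≤ f := by simp at hf; omega
      simp only [PySem.Chars.replace.go]
      by_cases h : c = ch
      · subst h
        have hpre : [c].isPrefixOf (c :: t) = true := by simp [List.isPrefixOf]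
        simp [hpre, ih f hft acc]
      · have hpre : [c].isPrefixOf (ch :: t) = false := by
          simp [List.isPrefixOf, h]
        have hne : (ch == c) = false := by simp [Ne.symm h]
        simp [hpre, ih f hft (ch :: acc), List.filter_cons]
        exact Ne.symm h

theorem pv_replace_filter (c : Char) (l : List Char) :
    PySem.Chars.replace l [c] [] = l.filter (fun x => x != c) := by
  simp [PySem.Chars.replace, pv_go_filter c l l.length (le_refl _) []]

-- dropWhile-level collapse: filtering with a whitespace-preserving predicate commutes past lstrip
theorem pv_dropWhile_filter (p : Char → Bool) (hp : ∀ c, PySem.Chars.isspace c = true → p c = true)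
    (l : List Char) :
    List.dropWhile PySem.Chars.isspace (List.filter p (List.dropWhile PySem.Chars.isspace l))
      = List.dropWhile PySem.Chars.isspace (List.filter p l) := by
  induction l with
  | nil => rfl
  | cons c t ih =>
    by_cases hws : PySem.Chars.isspace c = true
    · simp [hws, hp c hws, ih]
    · simp [hws]

theorem pv_lstrip_filter (p : Char → Bool) (hp : ∀ c, PySem.Chars.isspace c = true → p c = true)
    (l : List Char) :
    PySem.Chars.lstrip (List.filter p (PySem.Chars.lstrip l))
      = PySem.Chars.lstrip (List.filter p l) := by
  simpa [PySem.Chars.lstrip] using pv_dropWhile_filter p hp l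

theorem pv_rstrip_filter (p : Char → Bool) (hp : ∀ c, PySem.Chars.isspace c = true → p c = true)
    (l : List Char) :
    PySem.Chars.rstrip (List.filter p (PySem.Chars.rstrip l))
      = PySem.Chars.rstrip (List.filter p l) := by
  simp [PySem.Chars.rstrip, ← List.filter_reverse, pv_dropWhile_filter p hp]

-- dropping whitespace from the two ends commutes
theorem pv_lstrip_rstrip_comm (l : List Char) :
    PySem.Chars.lstrip (PySem.Chars.rstrip l) = PySem.Chars.rstrip (PySem.Chars.lstrip l) := by
  induction l with
  | nil => rfl
  | cons c t ih =>
    by_cases hws : PySem.Chars.isspace c = true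
    · by_cases he : List.dropWhile PySem.Chars.isspace t.reverse = []
      · have hallt : ∀ x ∈ t, PySem.Chars.isspace x = true := by
          intro x hx
          exact (List.dropWhile_eq_nil_iff.mp he) x (List.mem_reverse.mpr hx)
        have h1 : PySem.Chars.rstrip (c :: t) = [] := by
          simp [PySem.Chars.rstrip, List.dropWhile_append, he, hws]
        have h2 : PySem.Chars.lstrip (c :: t) = [] := by
          simp [PySem.Chars.lstrip, hws, List.dropWhile_eq_nil_iff]
          exact hallt
        rw [h1, h2]
        rfl
      · have he' : (List.dropWhile PySem.Chars.isspace t.reverse).isEmpty = false := by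
          simpa [List.isEmpty_iff] using he
        have h1 : PySem.Chars.rstrip (c :: t) = c :: PySem.Chars.rstrip t := by
          simp [PySem.Chars.rstrip, List.dropWhile_append, he']
        rw [h1]
        have h2 : PySem.Chars.lstrip (c :: PySem.Chars.rstrip t) = PySem.Chars.lstrip (PySem.Chars.rstrip t) := by
          simp [PySem.Chars.lstrip, hws]
        have h3 : PySem.Chars.lstrip (c :: t) = PySem.Chars.lstrip t := by
          simp [PySem.Chars.lstrip, hws]
        rw [h2, h3, ih]
    · have hws' : PySem.Chars.isspace c = false := by simpa using hws
      have h3 : PySem.Chars.lstrip (c :: t) = c :: t := by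
        simp [PySem.Chars.lstrip, hws']
      rw [h3]
      by_cases he : List.dropWhile PySem.Chars.isspace t.reverse = []
      · have h1 : PySem.Chars.rstrip (c :: t) = [c] := by
          simp [PySem.Chars.rstrip, List.dropWhile_append, he, hws']
        rw [h1]
        simp [PySem.Chars.lstrip, hws']
      · have he' : (List.dropWhile PySem.Chars.isspace t.reverse).isEmpty = false := by
          simpa [List.isEmpty_iff] using he
        have h1 : PySem.Chars.rstrip (c :: t) = c :: PySem.Chars.rstrip t := by
          simp [PySem.Chars.rstrip, List.dropWhile_append, he']
        rw [h1]
        simp [PySem.Chars.lstrip, hws']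

-- the per-iteration strip collapses: strip after filter after strip = strip after filter
theorem pv_strip_filter_strip (p : Char → Bool) (hp : ∀ c, PySem.Chars.isspace c = true → p c = true)
    (l : List Char) :
    PySem.Chars.strip (List.filter p (PySem.Chars.strip l))
      = PySem.Chars.strip (List.filter p l) := by
  have kl : ∀ x, PySem.Chars.strip (List.filter p (PySem.Chars.lstrip x))
      = PySem.Chars.strip (List.filter p x) := by
    intro x
    simp only [PySem.Chars.strip]
    rw [pv_lstrip_filter p hp]
  have kr : ∀ x, PySem.Chars.strip (List.filter p (PySem.Chars.rstrip x))
      = PySem.Chars.strip (List.filter p x) := by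
    intro x
    simp only [PySem.Chars.strip]
    rw [← pv_lstrip_rstrip_comm, pv_rstrip_filter p hp, pv_lstrip_rstrip_comm]
  calc PySem.Chars.strip (List.filter p (PySem.Chars.strip l))
      = PySem.Chars.strip (List.filter p (PySem.Chars.rstrip (PySem.Chars.lstrip l))) := rfl
    _ = PySem.Chars.strip (List.filter p (PySem.Chars.lstrip l)) := kr _
    _ = PySem.Chars.strip (List.filter p l) := kl _

-- A's loop over a non-empty list of non-whitespace chars is one filter + one strip
theorem pv_fold_collapse (cs : List Char) (hcs : cs ≠ [])
    (hws : ∀ c ∈ cs, PySem.Chars.isspace c = false) (l : List Char) :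
    cs.foldl (fun s c => PySem.Chars.strip (PySem.Chars.replace s [c] [])) l
      = PySem.Chars.strip (l.filter (fun x => !(cs.contains x))) := by
  induction cs generalizing l with
  | nil => exact absurd rfl hcs
  | cons c cs' ih =>
    rw [List.foldl_cons, pv_replace_filter]
    cases cs' with
    | nil =>
      simp only [List.foldl_nil]
      congr 1
      apply List.filter_congr
      intro x _
      by_cases h : x = c <;> simp [h]
    | cons c2 t2 =>
      rw [ih (by simp) (fun x hx => hws x (List.mem_cons_of_mem _ hx))]
      rw [pv_strip_filter_strip]
      · congr 1
        rw [List.filter_filter]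
        apply List.filter_congr
        intro x _
        by_cases h : x = c <;> simp [h]
      · intro d hd
        have hmem : (c2 :: t2).contains d = false := by
          by_cases hm : d ∈ (c2 :: t2)
          · have := hws d (List.mem_cons_of_mem _ hm)
            rw [this] at hd
            exact absurd hd (by simp)
          · simpa using hm
        simpa using hmem

-- bridge the String-level fold to the Chars-level fold
theorem pv_badA_eq : pvBadA = pvBadB.map (fun c => String.ofList [c]) := by
  simp [pvBadA, pvBadB]

theorem pv_fold_toList (l : List Char) :
    (pvBadA.foldl (fun s ch => PySem.Str.strip (PySem.Str.replace s ch "")) (String.ofList l)).toList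
      = pvBadB.foldl (fun s c => PySem.Chars.strip (PySem.Chars.replace s [c] [])) l := by
  rw [pv_badA_eq, List.foldl_map]
  induction pvBadB generalizing l with
  | nil => simp
  | cons c t ih =>
    simp only [List.foldl_cons]
    rw [show PySem.Str.strip (PySem.Str.replace (String.ofList l) (String.ofList [c]) "")
          = String.ofList (PySem.Chars.strip (PySem.Chars.replace l [c] [])) by
        simp [PySem.Str.strip, PySem.Str.replace]]
    exact ih _

-- ===== VERDICT (by name: the statement is the Claim_ definition above) =====
theorem pv_badB_ne_nil : pvBadB ≠ [] := by simp [pvBadB]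

theorem pv_badB_not_space : ∀ c ∈ pvBadB, PySem.Chars.isspace c = false := by
  intro c hc
  fin_cases hc <;> rfl

theorem format_field_value_spec : Claim_equal_format_field_value := by
  intro fv _
  unfold Spec_format_field_value
  have h1 : String.ofList fv.toList = fv := by simp
  have h2 := pv_fold_toList fv.toList
  rw [h1] at h2
  have h3 : (format_field_value fv).toList = (format_field_value_alt fv).toList := by
    unfold format_field_value format_field_value_alt
    rw [h2, pv_fold_collapse pvBadB pv_badB_ne_nil pv_badB_not_space fv.toList]
    simp [PySem.Str.strip]
  have h4 := congrArg String.ofList h3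
  rw [String.ofList_toList, String.ofList_toList] at h4
  exact h4
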